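-- pv_equiv track=rewrite | github.com/susiesko/pattern-maker-mono | crawler/spiders/miyuki_directory_crawler.py | _get_product_size
-- ===== SOURCE A (Python) =====
-- def _get_product_size(product_code: str) -> str:
--     """Determine product size based on product code prefix"""
--     size_mapping = {
--         'DBS-': '15/0',
--         'DB-': '11/0',
--         'DBM-': '10/0',
--         'DBL-': '8/0'
--     }
--
--     for prefix, size in size_mapping.items():
--         if product_code.startswith(prefix):
--             return size
--
--     return 'Unknown'
-- ===== SOURCE B (Python) =====
-- def _get_product_size(product_code: str) -> str:
--     """Determine product size based on product code prefix"""
--     size_mapping = {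
--         'DBS-': '15/0',
--         'DB-': '11/0',
--         'DBM-': '10/0',
--         'DBL-': '8/0'
--     }
--     # key = everything up to and including the first '-' ('' when there is no '-')
--     key = product_code[:product_code.find('-') + 1]
--     return size_mapping.get(key, 'Unknown')
-- ===== Notes on version B (the rewrite author's own statement) =====
-- stated objective: simpler
-- what changed: Replaces A's loop over the four prefixes calling startswith with computing the lookup key directly (the slice of the code up to and including its first dash) followed by a single dict .get with the default result.
import Mathlib
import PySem

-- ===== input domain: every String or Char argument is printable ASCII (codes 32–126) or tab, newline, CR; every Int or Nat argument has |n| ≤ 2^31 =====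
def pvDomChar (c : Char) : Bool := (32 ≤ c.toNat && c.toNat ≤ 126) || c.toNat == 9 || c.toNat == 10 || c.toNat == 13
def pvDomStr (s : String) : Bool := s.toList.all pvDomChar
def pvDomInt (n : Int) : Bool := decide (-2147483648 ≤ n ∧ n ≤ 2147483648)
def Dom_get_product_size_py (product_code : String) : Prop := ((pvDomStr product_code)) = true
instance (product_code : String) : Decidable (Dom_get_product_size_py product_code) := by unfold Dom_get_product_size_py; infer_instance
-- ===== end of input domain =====

-- B replaces A's prefix-scanning loop by computing the lookup key directly (the slice of the
-- code up to and including its first '-') and doing a single dict lookup; objective: simpler.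

-- ===== PORT A =====
-- the literal dict both Pythons build
def pySizeMapping : PySem.Dict String String :=
  PySem.Dict.ofList [("DBS-", "15/0"), ("DB-", "11/0"), ("DBM-", "10/0"), ("DBL-", "8/0")]

-- A: 'for prefix, size in size_mapping.items(): if product_code.startswith(prefix): return size'
-- = first item whose key is a prefix of product_code (early-return loop = List.find?)
def get_product_size_py (product_code : String) : String :=
  match pySizeMapping.items.find? (fun pv => PySem.Str.startswith product_code pv.1) with
  | some pv => pv.2
  | none => "Unknown"

-- ===== PORT B =====
-- B: key = product_code[:product_code.find('-') + 1]; return size_mapping.get(key, 'Unknown')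
def get_product_size_py_alt (product_code : String) : String :=
  let key := PySem.Str.slice product_code none (some (PySem.Str.find product_code "-" + 1))
  PySem.Dict.getD pySizeMapping key "Unknown"

-- ===== PRECONDITION & SPEC =====
def Spec_get_product_size_py (product_code : String) (out : String) : Prop := out = get_product_size_py_alt product_code
instance (product_code : String) (out : String) : Decidable (Spec_get_product_size_py product_code out) := by unfold Spec_get_product_size_py; infer_instance

-- ===== CLAIM (what is proved, stated in full; the proofs are below) =====
def Claim_equal_get_product_size_py : Prop := ∀ (product_code : String), Dom_get_product_size_py product_code → Spec_get_product_size_py product_code (get_product_size_py product_code)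

-- ===== LEMMAS AND PROOFS =====

lemma pv_singleton_prefix_iff (c : Char) (m : List Char) : [c] <+: m ↔ m.head? = some c := by
  cases m with
  | nil => simp
  | cons a t =>
    constructor
    · rintro ⟨u, hu⟩
      simp only [List.cons_append, List.cons.injEq] at hu
      simp [hu.1]
    · intro h
      simp only [List.head?_cons, Option.some.injEq] at h
      exact ⟨t, by simp [h]⟩

-- Chars.find points at the first '-'
lemma pv_find_dash_eq (l : List Char) (n : Nat) (h1 : l[n]? = some '-')
    (h2 : ∀ i < n, l[i]? ≠ some '-') : PySem.Chars.find l ['-'] = n := by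
  have hdropn : (['-'] : List Char) <+: l.drop n := by
    rw [pv_singleton_prefix_iff, List.head?_drop]; exact h1
  have hinfix : (['-'] : List Char) <:+: l :=
    (PySem.Chars.isIn_iff_infix _ _).mp ((PySem.Chars.exists_prefix_drop_iff_isIn _ _).mp ⟨n, hdropn⟩)
  have h0 : 0 ≤ PySem.Chars.find l ['-'] := (PySem.Chars.find_nonneg_iff _ _).mpr hinfix
  obtain ⟨hp, hmin⟩ := PySem.Chars.find_spec h0
  have hpm : l[(PySem.Chars.find l ['-']).toNat]? = some '-' := by
    rw [← List.head?_drop, ← pv_singleton_prefix_iff]; exact hp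
  have hmn : (PySem.Chars.find l ['-']).toNat = n := by
    rcases lt_trichotomy (PySem.Chars.find l ['-']).toNat n with h | h | h
    · exact absurd hpm (h2 _ h)
    · exact h
    · exact absurd hdropn (hmin n h)
  omega

theorem get_product_size_py_spec : Claim_equal_get_product_size_py := by
  unfold Claim_equal_get_product_size_py
  intro s _
  unfold Spec_get_product_size_py get_product_size_py get_product_size_py_alt
  have hitems : pySizeMapping.items
      = [("DBS-", "15/0"), ("DB-", "11/0"), ("DBM-", "10/0"), ("DBL-", "8/0")] := by decide
  have hkey : (PySem.Str.slice s none (some (PySem.Str.find s "-" + 1))).toList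
      = s.toList.take (PySem.Chars.find s.toList ['-'] + 1).toNat := by
    have hdl : ("-" : String).toList = ['-'] := by decide
    rw [PySem.Str.toList_slice, PySem.Chars.slice_eq_listSlice, PySem.List.slice_to]
    · simp [PySem.Str.find, hdl]
    · have := PySem.Chars.neg_one_le_find s.toList ['-']
      simp only [PySem.Str.find, hdl]
      omega
  have hbridge : ∀ p : String, PySem.Str.startswith s p = PySem.Chars.startswith s.toList p.toList := by
    intro p; simp
  -- a positive branch: from 'product_code starts with p' pin down the first '-' and hence the key
  have hpos : ∀ (p : String) (n : Nat), PySem.Str.startswith s p = true →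
      p.toList = s.toList.take (n + 1) →
      (∀ i < n, s.toList[i]? ≠ some '-') → s.toList[n]? = some '-' →
      (PySem.Str.slice s none (some (PySem.Str.find s "-" + 1))) = p := by
    intro p n hsw htake hmin hn
    have hf : PySem.Chars.find s.toList ['-'] = n := pv_find_dash_eq _ n hn hmin
    apply String.toList_inj.mp
    rw [hkey, hf, htake]
    norm_num
  -- any prefix test that fails rules the corresponding key out of the lookup
  have hfalse : ∀ p : String, PySem.Str.startswith s p = false →
      (p == PySem.Str.slice s none (some (PySem.Str.find s "-" + 1))) = false := by
    intro p hp
    cases hb : (p == PySem.Str.slice s none (some (PySem.Str.find s "-" + 1))) with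
    | false => rfl
    | true =>
      exfalso
      have hpk : p = PySem.Str.slice s none (some (PySem.Str.find s "-" + 1)) := eq_of_beq hb
      have hpl : p.toList <+: s.toList := by
        rw [hpk, hkey]; exact List.take_prefix _ _
      have : PySem.Str.startswith s p = true := by
        rw [hbridge]; exact (PySem.Chars.startswith_iff _ _).mpr hpl
      rw [hp] at this; exact Bool.false_ne_true this
  have hmk : pySizeMapping = PySem.Dict.mk
      [("DBS-", "15/0"), ("DB-", "11/0"), ("DBM-", "10/0"), ("DBL-", "8/0")] := by decide
  by_cases h1 : PySem.Str.startswith s "DBS-" = true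
  · obtain ⟨t, ht⟩ := (PySem.Chars.startswith_iff _ _).mp ((hbridge _) ▸ h1)
    have hl : s.toList = 'D'::'B'::'S'::'-'::t := by rw [← ht]; rfl
    have hk := hpos "DBS-" 3 h1 (by rw [hl]; rfl)
      (by intro i hi; rw [hl]; interval_cases i <;> simp) (by rw [hl]; rfl)
    have h1' : PySem.Chars.startswith s.toList ['D','B','S','-'] = true := by simpa using h1
    rw [hitems, hk, hmk]
    simp [List.find?, h1', PySem.Dict.getD, PySem.Dict.get?_mk_cons]
  · simp only [Bool.not_eq_true] at h1
    have h1' : PySem.Chars.startswith s.toList ['D','B','S','-'] = false := by simpa using h1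
    by_cases h2 : PySem.Str.startswith s "DB-" = true
    · obtain ⟨t, ht⟩ := (PySem.Chars.startswith_iff _ _).mp ((hbridge _) ▸ h2)
      have hl : s.toList = 'D'::'B'::'-'::t := by rw [← ht]; rfl
      have hk := hpos "DB-" 2 h2 (by rw [hl]; rfl)
        (by intro i hi; rw [hl]; interval_cases i <;> simp) (by rw [hl]; rfl)
      have h2' : PySem.Chars.startswith s.toList ['D','B','-'] = true := by simpa using h2
      rw [hitems, hk, hmk]
      simp [List.find?, h1', h2', PySem.Dict.getD, PySem.Dict.get?_mk_cons]
    · simp only [Bool.not_eq_true] at h2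
      have h2' : PySem.Chars.startswith s.toList ['D','B','-'] = false := by simpa using h2
      by_cases h3 : PySem.Str.startswith s "DBM-" = true
      · obtain ⟨t, ht⟩ := (PySem.Chars.startswith_iff _ _).mp ((hbridge _) ▸ h3)
        have hl : s.toList = 'D'::'B'::'M'::'-'::t := by rw [← ht]; rfl
        have hk := hpos "DBM-" 3 h3 (by rw [hl]; rfl)
          (by intro i hi; rw [hl]; interval_cases i <;> simp) (by rw [hl]; rfl)
        have h3' : PySem.Chars.startswith s.toList ['D','B','M','-'] = true := by simpa using h3
        rw [hitems, hk, hmk]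
        simp [List.find?, h1', h2', h3', PySem.Dict.getD, PySem.Dict.get?_mk_cons]
      · simp only [Bool.not_eq_true] at h3
        have h3' : PySem.Chars.startswith s.toList ['D','B','M','-'] = false := by simpa using h3
        by_cases h4 : PySem.Str.startswith s "DBL-" = true
        · obtain ⟨t, ht⟩ := (PySem.Chars.startswith_iff _ _).mp ((hbridge _) ▸ h4)
          have hl : s.toList = 'D'::'B'::'L'::'-'::t := by rw [← ht]; rfl
          have hk := hpos "DBL-" 3 h4 (by rw [hl]; rfl)
            (by intro i hi; rw [hl]; interval_cases i <;> simp) (by rw [hl]; rfl)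
          have h4' : PySem.Chars.startswith s.toList ['D','B','L','-'] = true := by simpa using h4
          rw [hitems, hk, hmk]
          simp [List.find?, h1', h2', h3', h4', PySem.Dict.getD, PySem.Dict.get?_mk_cons]
        · simp only [Bool.not_eq_true] at h4
          have h4' : PySem.Chars.startswith s.toList ['D','B','L','-'] = false := by simpa using h4
          have e1 : ("DBS-" == PySem.Str.slice s none (some (PySem.Chars.find s.toList ['-'] + 1))) = false := by
            simpa [beq_eq_false_iff_ne] using hfalse "DBS-" h1
          have e2 : ("DB-" == PySem.Str.slice s none (some (PySem.Chars.find s.toList ['-'] + 1))) = false := by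
            simpa [beq_eq_false_iff_ne] using hfalse "DB-" h2
          have e3 : ("DBM-" == PySem.Str.slice s none (some (PySem.Chars.find s.toList ['-'] + 1))) = false := by
            simpa [beq_eq_false_iff_ne] using hfalse "DBM-" h3
          have e4 : ("DBL-" == PySem.Str.slice s none (some (PySem.Chars.find s.toList ['-'] + 1))) = false := by
            simpa [beq_eq_false_iff_ne] using hfalse "DBL-" h4
          rw [hitems, hmk]
          simp [List.find?, h1', h2', h3', h4', PySem.Dict.getD,
            PySem.Dict.get?, e1, e2, e3, e4]
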